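-- pv_equiv track=rewrite | github.com/iFDVCS/spy-cy | AES_encrypt.py | mkstr
-- ===== SOURCE A (Python) =====
-- def mkstr(prefix):
-- 	if len(prefix) == 4:
-- 		return [prefix]
-- 	combs = []
-- 	combs.extend(mkstr(prefix + "A"))
-- 	combs.extend(mkstr(prefix + "T"))
-- 	combs.extend(mkstr(prefix + "G"))
-- 	combs.extend(mkstr(prefix + "C"))
-- 	return combs
-- ===== SOURCE B (Python) =====
-- def mkstr(prefix):
--     level = [prefix]
--     for _ in range(4 - len(prefix)):
--         level = [s + c for s in level for c in "ATGC"]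
--     return level
-- ===== Notes on version B (the rewrite author's own statement) =====
-- stated objective: simpler
-- what changed: Replaces the 4-way recursion with an iterative level-by-level worklist: each loop pass extends every string by one of A,T,G,C until length 4.
import Mathlib
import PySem

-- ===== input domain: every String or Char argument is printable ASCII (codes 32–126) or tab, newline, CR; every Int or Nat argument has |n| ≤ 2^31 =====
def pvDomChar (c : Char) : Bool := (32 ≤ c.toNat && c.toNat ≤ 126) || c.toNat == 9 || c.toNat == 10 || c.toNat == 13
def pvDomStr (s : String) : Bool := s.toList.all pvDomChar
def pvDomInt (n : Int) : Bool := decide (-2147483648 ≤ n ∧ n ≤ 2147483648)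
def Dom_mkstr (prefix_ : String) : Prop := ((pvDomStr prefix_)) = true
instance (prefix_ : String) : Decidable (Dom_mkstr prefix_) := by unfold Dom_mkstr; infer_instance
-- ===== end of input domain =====

-- B replaces A's 4-way recursion with an iterative level-by-level worklist loop (simpler decomposition, same cost).
-- ===== PORT A =====
-- A is recursive; the port uses fuel 4 (= max recursion depth on the admitted inputs
-- len(prefix) ≤ 4); for len > 4 Python A never terminates (excluded by Pre_).
def mkstrGo : Nat → List Char → List (List Char)
  | fuel, p =>
    if p.length = 4 then [p]
    else
      match fuel with
      | 0 => []
      | f + 1 =>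
        mkstrGo f (p ++ ['A']) ++ mkstrGo f (p ++ ['T']) ++
        mkstrGo f (p ++ ['G']) ++ mkstrGo f (p ++ ['C'])

def mkstr (prefix_ : String) : List String :=
  (mkstrGo 4 prefix_.toList).map (fun l => String.mk l)

-- ===== PORT B =====
def mkstr_alt (prefix_ : String) : List String :=
  let level :=
    (List.range (4 - prefix_.toList.length)).foldl
      (fun lv _ => lv.flatMap (fun s => ['A', 'T', 'G', 'C'].map (fun c => s ++ [c])))
      [prefix_.toList]
  level.map (fun l => String.mk l)

-- ===== PRECONDITION & SPEC =====
-- Pre_ excludes exactly the prefixes longer than 4 characters, on which Python A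
-- recurses forever (RecursionError).
def Pre_mkstr (prefix_ : String) : Prop := prefix_.toList.length ≤ 4
instance (prefix_ : String) : Decidable (Pre_mkstr prefix_) := by unfold Pre_mkstr; infer_instance
def pvWitness_mkstr : String := "AT"

def Spec_mkstr (prefix_ : String) (out : List String) : Prop := out = mkstr_alt prefix_
instance (prefix_ : String) (out : List String) : Decidable (Spec_mkstr prefix_ out) := by unfold Spec_mkstr; infer_instance

-- ===== CLAIM (what is proved, stated in full; the proofs are below) =====
def Claim_equal_mkstr : Prop := ∀ (prefix_ : String), Dom_mkstr prefix_ → Pre_mkstr prefix_ → Spec_mkstr prefix_ (mkstr prefix_)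

-- ===== LEMMAS AND PROOFS =====

-- One pass of B's loop body.
def step (lv : List (List Char)) : List (List Char) :=
  lv.flatMap (fun s => ['A', 'T', 'G', 'C'].map (fun c => s ++ [c]))

-- B's loop, as a function of the number of remaining passes.
def F (n : Nat) (lv : List (List Char)) : List (List Char) :=
  (List.range n).foldl (fun lv _ => step lv) lv

lemma F_succ_front (n : Nat) (lv : List (List Char)) : F (n + 1) lv = F n (step lv) := by
  simp [F, List.range_succ_eq_map, List.foldl_map]

lemma step_append (l1 l2 : List (List Char)) : step (l1 ++ l2) = step l1 ++ step l2 := by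
  simp [step]

lemma F_append (n : Nat) (l1 l2 : List (List Char)) : F n (l1 ++ l2) = F n l1 ++ F n l2 := by
  induction n generalizing l1 l2 with
  | zero => simp [F]
  | succ n ih => rw [F_succ_front, F_succ_front, F_succ_front, step_append, ih]

lemma mkstrGo_eq_F (f : Nat) (p : List Char) (hlen : p.length ≤ 4)
    (hf : 4 - p.length ≤ f) : mkstrGo f p = F (4 - p.length) [p] := by
  induction f generalizing p with
  | zero =>
    have h4 : p.length = 4 := by omega
    rw [mkstrGo]
    simp [h4, F]
  | succ f ih =>
    rw [mkstrGo]
    by_cases h4 : p.length = 4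
    · simp [h4, F]
    · have hlt : p.length < 4 := by omega
      simp only [h4, if_false]
      have hstep : step [p] = [p ++ ['A']] ++ [p ++ ['T']] ++ [p ++ ['G']] ++ [p ++ ['C']] := by
        simp [step]
      have hk : ∀ c : Char, 4 - (p ++ [c]).length = 4 - p.length - 1 := by
        intro c; simp; omega
      have hn : 4 - p.length = (4 - p.length - 1) + 1 := by omega
      rw [ih (p ++ ['A']) (by simp; omega) (by simp; omega),
          ih (p ++ ['T']) (by simp; omega) (by simp; omega),
          ih (p ++ ['G']) (by simp; omega) (by simp; omega),
          ih (p ++ ['C']) (by simp; omega) (by simp; omega),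
          hk, hk, hk, hk, hn, F_succ_front, hstep, F_append, F_append, F_append, Nat.add_sub_cancel]

-- ===== VERDICT (by name: the statement is the Claim_ definition above) =====
theorem mkstr_spec : Claim_equal_mkstr := by
  intro prefix_ _ hpre
  unfold Spec_mkstr mkstr mkstr_alt
  rw [mkstrGo_eq_F 4 prefix_.toList hpre (by omega)]
  rfl
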